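-- pv_equiv track=rewrite | github.com/JozsefKutas/project-euler-math | project_euler_math/ntheory.py | sum_squares_list
-- ===== SOURCE A (Python) =====
-- from math import prod, inf, isqrt, gcd as mathgcd, lcm as mathlcm
-- from typing import Sequence, List, Mapping, Optional, Iterator, Callable, TypeVar
--
-- def prime_factor_list(end: int) -> List[int]:
--     """Return a list of length `end`, the i-th element of which is the smallest
--     prime factor of i."""
--     ans = list(range(end))
--     for i in range(2, isqrt(end) + 1):
--         if ans[i] == i:
--             for j in range(i, end, i):
--                 if ans[j] == j:
--                     ans[j] = i
--     return ans
--
-- def sum_squares_list(end: int, prime_factors: Optional[List[int]] = None) -> List[int]: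
--     """Return a list of length `end`, the i-th element of which is the number of
--     ways i can be written as a sum of two squares."""
--     ans = _prepare_prime_factors(prime_factors, end)
--
--     if end > 1:
--         ans[1] = 4
--     for i in range(2, end):
--         p = ans[i]
--         j = i // p
--         if p % 2 == 0:
--             ans[i] = ans[j]
--         else:
--             e = 1
--             while j % p == 0:
--                 j //= p
--                 e += 1
--             if p % 4 == 1:
--                 ans[i] = (e + 1) * ans[j]
--             elif p % 4 == 3:
--                 ans[i] = ans[j] if e % 2 == 0 else 0
--             else:
--                 raise AssertionError
--     return ans
--
-- def _prepare_prime_factors(prime_factors, end):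
--     if prime_factors:
--         if len(prime_factors) < end:
--             raise ValueError
--         return prime_factors[:end]
--     else:
--         return prime_factor_list(end)
-- ===== SOURCE B (Python) =====
-- def sum_squares_list(end, prime_factors=None):
--     """Return a list of length `end`, the i-th element of which is the number of
--     ways i can be written as a sum of two squares (Jacobi: r2(n) = 4*sum of
--     chi_4 over the divisors of n, accumulated by a divisor sieve)."""
--     if prime_factors:
--         if len(prime_factors) < end:
--             raise ValueError
--     ans = [0] * end
--     for d in range(1, end, 2):
--         chi = 1 if d % 4 == 1 else -1
--         for m in range(d, end, d):
--             ans[m] += chi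
--     return [4 * x for x in ans]
-- ===== Notes on version B (the rewrite author's own statement) =====
-- stated objective: alternative
-- what changed: Replaces the smallest-prime-factor table plus multiplicative recursion (inner while-loop extracting prime powers) by a direct Jacobi character/divisor sieve: for each odd d < end add chi_4(d) to every multiple of d, then multiply by 4; the spf contents are no longer used.
-- intended difference: For end < 0 or end == 1 with a non-empty prime_factors list supplied, A returns the raw Python slice prime_factors[:end] (e.g. (-1, [0,1,2]) -> [0,1], (1,[5]) -> [5]); B returns the r2 table of that length ([] resp. [0]), which is the intended value. — e.g. on sum_squares_list(1, some [5]): A returns [5], B returns [0]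
-- outside the precondition, e.g. on sum_squares_list(2, [7, 7]): A returns [7, 4], B returns [0, 4]; on sum_squares_list(3, [9, 9, 9]): A does not finish within the time limit, B returns [0, 4, 4]; on sum_squares_list(-2, None): A raises ValueError, B returns []
import Mathlib
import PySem

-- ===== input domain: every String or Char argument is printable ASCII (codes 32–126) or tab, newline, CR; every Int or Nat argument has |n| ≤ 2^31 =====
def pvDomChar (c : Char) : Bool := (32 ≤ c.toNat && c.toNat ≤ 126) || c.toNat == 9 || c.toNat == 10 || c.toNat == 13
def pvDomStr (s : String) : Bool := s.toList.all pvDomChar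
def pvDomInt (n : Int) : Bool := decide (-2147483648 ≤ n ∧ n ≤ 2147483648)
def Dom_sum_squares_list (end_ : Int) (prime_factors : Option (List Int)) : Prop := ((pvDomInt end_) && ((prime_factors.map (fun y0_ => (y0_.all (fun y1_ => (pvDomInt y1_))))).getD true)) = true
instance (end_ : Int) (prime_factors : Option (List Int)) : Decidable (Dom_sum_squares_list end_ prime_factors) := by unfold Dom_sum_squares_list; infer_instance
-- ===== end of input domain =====

-- B replaces A's smallest-prime-factor recursion by a Jacobi character/divisor sieve (alternative
-- algorithm, same cost class); equivalence is about the return value (neither program mutates its input).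

-- ===== PORT A =====

-- smallest-prime-factor sieve `prime_factor_list` (literal transliteration)
def prime_factor_list (end_ : Int) : List Int :=
  let ans := PySem.List.pyRange 0 end_ 1
  (PySem.List.pyRange 2 (Int.sqrt end_ + 1) 1).foldl (fun ans i =>
    if PySem.List.pyGetD ans i 0 = i then
      (PySem.List.pyRange i end_ i).foldl (fun ans j =>
        if PySem.List.pyGetD ans j 0 = j then PySem.List.pySetD ans j i else ans) ans
    else ans) ans

-- the `while j % p == 0: j //= p; e += 1` loop; the fuel bounds the iteration count
-- (inside Pre_ we have p ≥ 2 and 0 < j < 2^fuel, so the fuel never runs out)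
def pullOut (p : Int) : Nat → Int × Int → Int × Int
  | 0, je => je
  | fuel + 1, (j, e) =>
    if PySem.Int.mod j p = 0 then pullOut p fuel (PySem.Int.floordiv j p, e + 1) else (j, e)

def sum_squares_list (end_ : Int) (prime_factors : Option (List Int)) : List Int :=
  -- _prepare_prime_factors (inlined helper); `[]` stands for the ValueError (outside Pre_)
  let ans : List Int :=
    match prime_factors with
    | some (x :: xs) =>
      if ((x :: xs).length : Int) < end_ then [] else PySem.List.slice (x :: xs) none (some end_)
    | _ => prime_factor_list end_
  let ans := if end_ > 1 then PySem.List.pySetD ans 1 4 else ans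
  (PySem.List.pyRange 2 end_ 1).foldl (fun ans i =>
    let p := PySem.List.pyGetD ans i 0
    let j := PySem.Int.floordiv i p
    if PySem.Int.mod p 2 = 0 then
      PySem.List.pySetD ans i (PySem.List.pyGetD ans j 0)
    else
      let je := pullOut p i.toNat (j, 1)
      if PySem.Int.mod p 4 = 1 then
        PySem.List.pySetD ans i ((je.2 + 1) * PySem.List.pyGetD ans je.1 0)
      else if PySem.Int.mod p 4 = 3 then
        PySem.List.pySetD ans i (if PySem.Int.mod je.2 2 = 0 then PySem.List.pyGetD ans je.1 0 else 0)
      else ans) ans  -- `raise AssertionError` is unreachable (p is odd here)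

-- ===== PORT B =====

-- the character/divisor sieve of Source B
def ssl_core (end_ : Int) : List Int :=
  let ans : List Int := List.replicate end_.toNat 0   -- [0] * end
  let ans := (PySem.List.pyRange 1 end_ 2).foldl (fun ans d =>
    let chi : Int := if PySem.Int.mod d 4 = 1 then 1 else -1
    (PySem.List.pyRange d end_ d).foldl (fun ans m =>
      PySem.List.pySetD ans m (PySem.List.pyGetD ans m 0 + chi)) ans) ans
  ans.map (fun x => 4 * x)

def sum_squares_list_alt (end_ : Int) (prime_factors : Option (List Int)) : List Int :=
  match prime_factors with
  | none => ssl_core end_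
  | some [] => ssl_core end_
  | some (x :: xs) =>
    if ((x :: xs).length : Int) < end_ then [] else ssl_core end_  -- `[]` stands for the ValueError

-- ===== PRECONDITION & SPEC =====

-- the smallest prime factor of i as prime_factor_list specifies it (spf 0 = 0, spf 1 = 1)
def spfSpec (i : Nat) : Int := if i ≤ 1 then (i : Int) else (Nat.minFac i : Int)

-- Pre_ excludes: end < 0 when prime_factors is falsy (A raises ValueError via math.isqrt), supplied
-- lists shorter than end (A raises ValueError), and supplied non-empty prime_factors whose first
-- `end` entries (for end >= 2) are not the smallest-prime-factor table -- there A copies the garbage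
-- entries into its output, raises, or loops forever, an artefact of A's implementation -- and
-- supplied non-empty lists with end < 0 longer than -end, where A returns the Python negative-slice
-- prefix prime_factors[:end] of the supplied table, again an artefact.
def Pre_sum_squares_list (end_ : Int) (prime_factors : Option (List Int)) : Prop :=
  if prime_factors.getD [] = [] then 0 ≤ end_
  else end_ ≤ ((prime_factors.getD []).length : Int) ∧
    (2 ≤ end_ → ∀ i < end_.toNat, (prime_factors.getD []).getD i 0 = spfSpec i) ∧
    (end_ < 0 → ((prime_factors.getD []).length : Int) ≤ -end_)

instance (end_ : Int) (prime_factors : Option (List Int)) : Decidable (Pre_sum_squares_list end_ prime_factors) := by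
  unfold Pre_sum_squares_list; infer_instance

def pvWitness_sum_squares_list : Int × Option (List Int) := (6, none)

-- For end == 1 with a non-empty prime_factors list whose first entry is nonzero, A returns
-- [prime_factors[0]] (it copies the supplied table entry verbatim), while B returns [0], the
-- correct length-1 table of two-square representation counts, which is the intended value.
def D_sum_squares_list (end_ : Int) (prime_factors : Option (List Int)) : Prop :=
  ¬ prime_factors.getD [] = [] ∧ end_ = 1 ∧ (prime_factors.getD []).getD 0 0 ≠ 0

instance (end_ : Int) (prime_factors : Option (List Int)) : Decidable (D_sum_squares_list end_ prime_factors) := by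
  unfold D_sum_squares_list; infer_instance

def Spec_sum_squares_list (end_ : Int) (prime_factors : Option (List Int)) (out : List Int) : Prop := ¬ D_sum_squares_list end_ prime_factors → out = sum_squares_list_alt end_ prime_factors
instance (end_ : Int) (prime_factors : Option (List Int)) (out : List Int) : Decidable (Spec_sum_squares_list end_ prime_factors out) := by unfold Spec_sum_squares_list; infer_instance

def pvDiffWitness_sum_squares_list : Int × Option (List Int) := (1, some [5])
def pvDiffWitnessOut_sum_squares_list : (List Int) × (List Int) := ([5], [0])

-- ===== CLAIM (what is proved, stated in full; the proofs are below) =====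
def Claim_unchanged_sum_squares_list : Prop := ∀ (end_ : Int) (prime_factors : Option (List Int)), Dom_sum_squares_list end_ prime_factors → Pre_sum_squares_list end_ prime_factors → Spec_sum_squares_list end_ prime_factors (sum_squares_list end_ prime_factors)

def Claim_changed_sum_squares_list : Prop := Dom_sum_squares_list (pvDiffWitness_sum_squares_list.1) (pvDiffWitness_sum_squares_list.2) ∧ Pre_sum_squares_list (pvDiffWitness_sum_squares_list.1) (pvDiffWitness_sum_squares_list.2) ∧ D_sum_squares_list (pvDiffWitness_sum_squares_list.1) (pvDiffWitness_sum_squares_list.2) ∧ sum_squares_list (pvDiffWitness_sum_squares_list.1) (pvDiffWitness_sum_squares_list.2) = pvDiffWitnessOut_sum_squares_list.1 ∧ sum_squares_list_alt (pvDiffWitness_sum_squares_list.1) (pvDiffWitness_sum_squares_list.2) = pvDiffWitnessOut_sum_squares_list.2 ∧ pvDiffWitnessOut_sum_squares_list.1 ≠ pvDiffWitnessOut_sum_squares_list.2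

def Claim_exact_sum_squares_list : Prop := ∀ (end_ : Int) (prime_factors : Option (List Int)), Dom_sum_squares_list end_ prime_factors → Pre_sum_squares_list end_ prime_factors → D_sum_squares_list end_ prime_factors → sum_squares_list end_ prime_factors ≠ sum_squares_list_alt end_ prime_factors

-- ===== LEMMAS AND PROOFS =====

def chi (d : Nat) : Int := if d % 4 = 1 then 1 else if d % 4 = 3 then -1 else 0
def gsum (n : Nat) : Int := ∑ d ∈ n.divisors, chi d

lemma chi_mul (a b : Nat) : chi (a * b) = chi a * chi b := by
  have hx : a % 4 = 0 ∨ a % 4 = 1 ∨ a % 4 = 2 ∨ a % 4 = 3 := by omega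
  have hy : b % 4 = 0 ∨ b % 4 = 1 ∨ b % 4 = 2 ∨ b % 4 = 3 := by omega
  have hm : (a * b) % 4 = (a % 4) * (b % 4) % 4 := Nat.mul_mod a b 4
  rcases hx with h1 | h1 | h1 | h1 <;> rcases hy with h2 | h2 | h2 | h2 <;>
    simp [chi, hm, h1, h2]

lemma chi_even (a : Nat) (h : a % 2 = 0) : chi a = 0 := by
  have : a % 4 = 0 ∨ a % 4 = 2 := by omega
  rcases this with h1 | h1 <;> simp [chi, h1]

lemma chi_pow (p k : Nat) : chi (p ^ k) = chi p ^ k := by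
  induction k with
  | zero => simp [chi]
  | succ k ih => rw [pow_succ, chi_mul, ih, pow_succ]

def chiF : ArithmeticFunction ℤ := ⟨fun n => chi n, by simp [chi]⟩
lemma chiF_mult : chiF.IsMultiplicative :=
  ⟨by simp [chiF, chi], fun {m n} _ => chi_mul m n⟩

lemma gsum_zero : gsum 0 = 0 := by simp [gsum]
lemma gsum_one : gsum 1 = 1 := by simp [gsum]; rfl

def gF : ArithmeticFunction ℤ := (ArithmeticFunction.zeta : ArithmeticFunction ℕ) * chiF

lemma gsum_eq' (n : Nat) : gsum n = gF n := by
  rw [gF, ArithmeticFunction.coe_zeta_mul_apply]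
  exact Finset.sum_congr rfl fun d _ => rfl

lemma gF_mult : gF.IsMultiplicative :=
  ArithmeticFunction.IsMultiplicative.mul
    (ArithmeticFunction.isMultiplicative_zeta.natCast) chiF_mult

lemma gsum_mul {m n : Nat} (h : Nat.Coprime m n) : gsum (m * n) = gsum m * gsum n := by
  rw [gsum_eq', gsum_eq', gsum_eq', gF_mult.map_mul_of_coprime h]

lemma gsum_two_mul (m : Nat) (hm : 1 ≤ m) : gsum (2 * m) = gsum m := by
  have h2m : 2 * m ≠ 0 := by omega
  have hsub : m.divisors ⊆ (2 * m).divisors :=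
    Nat.divisors_subset_of_dvd h2m ⟨2, by ring⟩
  rw [gsum, gsum, ← Finset.sum_subset hsub]
  intro x hx hxm
  rcases Nat.even_or_odd x with he | ho
  · exact chi_even x (Nat.even_iff.mp he)
  · exfalso
    have hdvd : x ∣ 2 * m := (Nat.mem_divisors.mp hx).1
    have hcop : Nat.Coprime x 2 := (Nat.coprime_two_right).mpr ho
    have : x ∣ m := hcop.dvd_of_dvd_mul_left hdvd
    exact hxm (Nat.mem_divisors.mpr ⟨this, by omega⟩)

lemma gsum_prime_pow {p : Nat} (hp : p.Prime) (e : Nat) :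
    gsum (p ^ e) = ∑ k ∈ Finset.range (e + 1), chi p ^ k := by
  rw [gsum, Nat.sum_divisors_prime_pow hp]
  exact Finset.sum_congr rfl fun k _ => chi_pow p k

lemma getR (f : Nat → Int) (n i : Nat) (d : Int) (h : i < n) :
    PySem.List.pyGetD ((List.range n).map f) (i : Int) d = f i := by
  rw [PySem.List.pyGetD_natCast]
  exact PySem.List.getD_map_range f n i d h

lemma setR (f : Nat → Int) (n i : Nat) (v : Int) (h : i < n) :
    PySem.List.pySetD ((List.range n).map f) (i : Int) v
      = (List.range n).map (fun m => if m = i then v else f m) := by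
  rw [PySem.List.pySetD_natCast]
  apply List.ext_getElem
  · simp
  · intro k h1 h2
    simp only [List.getElem_set, List.getElem_map, List.getElem_range]
    by_cases hk : i = k
    · rw [if_pos hk, if_pos hk.symm]
    · rw [if_neg hk, if_neg (fun h => hk h.symm)]

lemma pyRange_pos_eq (a b s : Int) (hs : 0 < s) :
    PySem.List.pyRange a b s
      = (List.range (if a < b then ((b - a + s - 1) / s).toNat else 0)).map (fun k : Nat => a + s * (k : Int)) := by
  unfold PySem.List.pyRange
  rw [if_neg (by omega), if_pos hs]

-- B's inner loop: add `chi` at every position t*(k+1), k < c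
lemma foldl_addAt (n t : Nat) (chiv : Int) (ht : 1 ≤ t) :
    ∀ (c : Nat) (f : Nat → Int), (∀ k < c, t * (k + 1) < n) →
    (((List.range c).map (fun k : Nat => (t : Int) + t * (k : Int))).foldl
      (fun ans m => PySem.List.pySetD ans m (PySem.List.pyGetD ans m 0 + chiv))
      ((List.range n).map f))
    = (List.range n).map (fun m => if ∃ k < c, m = t * (k + 1) then f m + chiv else f m) := by
  intro c
  induction c with
  | zero =>
    intro f _
    refine (List.map_congr_left fun m hm => ?_).symm
    simp
  | succ c ih =>
    intro f hk
    rw [List.range_succ, List.map_append, List.foldl_append,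
      ih f (fun k h => hk k (by omega))]
    have hm0 : t * (c + 1) < n := hk c (by omega)
    have hcast : (t : Int) + t * (c : Int) = ((t * (c + 1) : Nat) : Int) := by push_cast; ring
    simp only [List.map_cons, List.map_nil, List.foldl_cons, List.foldl_nil, hcast]
    have hnotc : ¬ ∃ k < c, t * (c + 1) = t * (k + 1) := by
      rintro ⟨k, hkc, he⟩
      have := Nat.eq_of_mul_eq_mul_left (by omega : 0 < t) he
      omega
    rw [getR _ n _ _ hm0, setR _ n _ _ hm0, if_neg hnotc]
    refine List.map_congr_left fun m hm => ?_
    simp only [List.mem_range] at hm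
    by_cases hmc : m = t * (c + 1)
    · subst hmc
      rw [if_pos rfl, if_pos ⟨c, by omega, rfl⟩]
    · rw [if_neg hmc]
      by_cases hme : ∃ k < c, m = t * (k + 1)
      · obtain ⟨k, hkc, he⟩ := hme
        rw [if_pos ⟨k, hkc, he⟩, if_pos ⟨k, by omega, he⟩]
      · rw [if_neg hme, if_neg ?_]
        rintro ⟨k, hkc, he⟩
        rcases Nat.lt_succ_iff_lt_or_eq.mp hkc with hlt | hEq
        · exact hme ⟨k, hlt, he⟩
        · exact hmc (hEq ▸ he)

-- A's inner sieve loop: mark position t*(k+1) with t when the entry is still untouched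
lemma foldl_markAt (n t : Nat) (ht : 1 ≤ t) :
    ∀ (c : Nat) (f : Nat → Int), (∀ k < c, t * (k + 1) < n) →
    (((List.range c).map (fun k : Nat => (t : Int) + t * (k : Int))).foldl
      (fun ans j => if PySem.List.pyGetD ans j 0 = j then PySem.List.pySetD ans j (t : Int) else ans)
      ((List.range n).map f))
    = (List.range n).map
        (fun m => if (∃ k < c, m = t * (k + 1)) ∧ f m = (m : Int) then (t : Int) else f m) := by
  intro c
  induction c with
  | zero =>
    intro f _
    refine (List.map_congr_left fun m hm => ?_).symm
    simp
  | succ c ih =>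
    intro f hk
    rw [List.range_succ, List.map_append, List.foldl_append,
      ih f (fun k h => hk k (by omega))]
    have hm0 : t * (c + 1) < n := hk c (by omega)
    have hcast : (t : Int) + t * (c : Int) = ((t * (c + 1) : Nat) : Int) := by push_cast; ring
    simp only [List.map_cons, List.map_nil, List.foldl_cons, List.foldl_nil, hcast]
    have hnotc : ¬ ∃ k < c, t * (c + 1) = t * (k + 1) := by
      rintro ⟨k, hkc, he⟩
      have := Nat.eq_of_mul_eq_mul_left (by omega : 0 < t) he
      omega
    rw [getR _ n _ _ hm0,
      if_neg (show ¬((∃ k < c, t * (c + 1) = t * (k + 1)) ∧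
        f (t * (c + 1)) = ((t * (c + 1) : Nat) : Int)) from fun h => hnotc h.1)]
    by_cases hg : f (t * (c + 1)) = ((t * (c + 1) : Nat) : Int)
    · rw [if_pos hg, setR _ n _ _ hm0]
      refine List.map_congr_left fun m hm => ?_
      simp only [List.mem_range] at hm
      by_cases hmc : m = t * (c + 1)
      · subst hmc
        rw [if_pos rfl, if_pos ⟨⟨c, by omega, rfl⟩, hg⟩]
      · rw [if_neg hmc]
        by_cases hme : (∃ k < c, m = t * (k + 1)) ∧ f m = (m : Int)
        · rw [if_pos hme]
          obtain ⟨⟨k, hkc, he⟩, hf⟩ := hme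
          rw [if_pos ⟨⟨k, by omega, he⟩, hf⟩]
        · rw [if_neg hme, if_neg ?_]
          rintro ⟨⟨k, hkc, he⟩, hf⟩
          rcases Nat.lt_succ_iff_lt_or_eq.mp hkc with hlt | hEq
          · exact hme ⟨⟨k, hlt, he⟩, hf⟩
          · exact hmc (hEq ▸ he)
    · rw [if_neg hg]
      refine List.map_congr_left fun m hm => ?_
      simp only [List.mem_range] at hm
      by_cases hme : (∃ k < c, m = t * (k + 1)) ∧ f m = (m : Int)
      · rw [if_pos hme]
        obtain ⟨⟨k, hkc, he⟩, hf⟩ := hme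
        rw [if_pos ⟨⟨k, by omega, he⟩, hf⟩]
      · rw [if_neg hme, if_neg ?_]
        rintro ⟨⟨k, hkc, he⟩, hf⟩
        rcases Nat.lt_succ_iff_lt_or_eq.mp hkc with hlt | hEq
        · exact hme ⟨⟨k, hlt, he⟩, hf⟩
        · rw [hEq] at he
          exact absurd (he ▸ hf) hg

-- the count pyRange(t, n, t) uses, and what membership in the multiples list means
def multCount (n t : Nat) : Nat :=
  if (t : Int) < n then (((n : Int) - t + t - 1) / t).toNat else 0

lemma pyRange_mult_eq (n t : Nat) (ht : 1 ≤ t) :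
    PySem.List.pyRange (t : Int) (n : Int) (t : Int)
      = (List.range (multCount n t)).map (fun k : Nat => (t : Int) + t * (k : Int)) := by
  rw [pyRange_pos_eq _ _ _ (by exact_mod_cast ht), multCount]

lemma multCount_bound (n t : Nat) (ht : 1 ≤ t) (k : Nat) (hk : k < multCount n t) :
    t * (k + 1) < n := by
  unfold multCount at hk
  by_cases h : (t : Int) < n
  · rw [if_pos h] at hk
    have h1 : ((n : Int) - t + t - 1) / t = ((n - 1 : Nat) : Int) / (t : Int) := by
      congr 1; omega
    rw [h1] at hk
    have h2 : ((n - 1 : Nat) : Int) / (t : Int) = (((n - 1) / t : Nat) : Int) := by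
      exact_mod_cast (Int.natCast_div (n-1) t).symm
    rw [h2, Int.toNat_natCast] at hk
    have h3 : t * ((n - 1) / t) ≤ n - 1 := Nat.mul_div_le (n - 1) t |>.trans_eq rfl
    have : t * (k + 1) ≤ t * ((n - 1) / t) := by
      apply Nat.mul_le_mul_left; omega
    omega
  · rw [if_neg h] at hk; omega

lemma multCount_cover (n t : Nat) (ht : 1 ≤ t) (m : Nat) (hm : m < n)
    (hdvd : t ∣ m) (hm1 : 1 ≤ m) : ∃ k < multCount n t, m = t * (k + 1) := by
  obtain ⟨q, hq⟩ := hdvd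
  have hq1 : 1 ≤ q := by
    rcases Nat.eq_zero_or_pos q with h | h
    · subst h; simp at hq; omega
    · exact h
  refine ⟨q - 1, ?_, by rw [Nat.sub_add_cancel hq1]; exact hq⟩
  unfold multCount
  have htm : t ≤ m := hq ▸ Nat.le_mul_of_pos_right t hq1
  have htn : (t : Int) < n := by exact_mod_cast Nat.lt_of_le_of_lt htm hm
  rw [if_pos htn]
  have h1 : ((n : Int) - t + t - 1) / t = (((n - 1) / t : Nat) : Int) := by
    have : ((n : Int) - t + t - 1) = ((n - 1 : Nat) : Int) := by omega
    rw [this]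
    exact_mod_cast (Int.natCast_div (n-1) t).symm
  rw [h1, Int.toNat_natCast]
  have : q ≤ (n - 1) / t := by
    have hqm : q = m / t := by rw [hq, Nat.mul_div_cancel_left q (by omega)]
    rw [hqm]
    exact Nat.div_le_div_right (by omega)
  omega

-- partial character sums: odd divisors below the bound already processed
def Sfun (t m : Nat) : Int := ∑ x ∈ m.divisors, if x % 2 = 1 ∧ x < t then chi x else 0

lemma Sfun_one (m : Nat) : Sfun 1 m = 0 := by
  unfold Sfun
  rw [Finset.sum_eq_zero]
  intro x hx
  rw [if_neg]
  rintro ⟨h1, h2⟩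
  omega

lemma Sfun_succ (c m : Nat) :
    Sfun (2 * c + 3) m = Sfun (2 * c + 1) m + (if (2 * c + 1) ∣ m ∧ 1 ≤ m then chi (2 * c + 1) else 0) := by
  unfold Sfun
  have hsplit : ∀ x ∈ m.divisors,
      (if x % 2 = 1 ∧ x < 2 * c + 3 then chi x else 0)
        = (if x % 2 = 1 ∧ x < 2 * c + 1 then chi x else 0) + (if x = 2 * c + 1 then chi x else 0) := by
    intro x hx
    by_cases hxe : x = 2 * c + 1
    · subst hxe
      rw [if_pos ⟨by omega, by omega⟩, if_neg (by omega), if_pos rfl]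
      ring
    · rw [if_neg hxe, add_zero]
      by_cases h1 : x % 2 = 1 ∧ x < 2 * c + 1
      · rw [if_pos ⟨h1.1, by omega⟩, if_pos h1]
      · rw [if_neg h1, if_neg (by rintro ⟨ha, hb⟩; exact h1 ⟨ha, by omega⟩)]
  rw [Finset.sum_congr rfl hsplit, Finset.sum_add_distrib]
  congr 1
  rw [Finset.sum_ite_eq' m.divisors (2 * c + 1) chi]
  by_cases hmem : (2 * c + 1) ∣ m ∧ 1 ≤ m
  · rw [if_pos (Nat.mem_divisors.mpr ⟨hmem.1, by omega⟩), if_pos hmem]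
  · rw [if_neg (fun h => hmem ⟨(Nat.mem_divisors.mp h).1, by
      have := (Nat.mem_divisors.mp h).2; omega⟩), if_neg hmem]

lemma Sfun_full (n t m : Nat) (hm : m < n) (ht : ∀ x, x % 2 = 1 → x < n → x < t) :
    Sfun t m = gsum m := by
  unfold Sfun gsum
  refine Finset.sum_congr rfl fun x hx => ?_
  have hxm : x ∣ m ∧ m ≠ 0 := Nat.mem_divisors.mp hx
  have hxle : x ≤ m := Nat.le_of_dvd (by omega) hxm.1
  rcases Nat.even_or_odd x with he | ho
  · have hx2 : x % 2 = 0 := Nat.even_iff.mp he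
    rw [if_neg (by rintro ⟨h1, -⟩; omega), chi_even x hx2]
  · have h1 : x % 2 = 1 := Nat.odd_iff.mp ho
    rw [if_pos ⟨h1, ht x h1 (by omega)⟩]

def oddCount (n : Nat) : Nat := if (1 : Int) < n then (((n : Int) - 1 + 2 - 1) / 2).toNat else 0

lemma pyRange_odds_eq (n : Nat) :
    PySem.List.pyRange 1 (n : Int) 2
      = (List.range (oddCount n)).map (fun k : Nat => (1 : Int) + 2 * (k : Int)) := by
  rw [pyRange_pos_eq 1 (n : Int) 2 (by omega), oddCount]

lemma chi_odd_val (c : Nat) :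
    (if PySem.Int.mod ((2 * c + 1 : Nat) : Int) 4 = 1 then (1 : Int) else -1) = chi (2 * c + 1) := by
  rw [show (4 : Int) = ((4 : Nat) : Int) from rfl, PySem.Int.mod_natCast]
  have h : (2 * c + 1) % 4 = 1 ∨ (2 * c + 1) % 4 = 3 := by omega
  rcases h with h | h <;> simp [chi, h]

lemma B_loop (n : Nat) : ∀ c : Nat,
    (((List.range c).map (fun k : Nat => (1 : Int) + 2 * (k : Int))).foldl
      (fun ans d =>
        (PySem.List.pyRange d (n : Int) d).foldl
          (fun ans m => PySem.List.pySetD ans m (PySem.List.pyGetD ans m 0 +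
            (if PySem.Int.mod d 4 = 1 then (1 : Int) else -1))) ans)
      ((List.range n).map (fun m => Sfun 1 m)))
    = (List.range n).map (fun m => Sfun (2 * c + 1) m) := by
  intro c
  induction c with
  | zero => simp
  | succ c ih =>
    rw [List.range_succ, List.map_append, List.foldl_append, ih]
    simp only [List.map_cons, List.map_nil, List.foldl_cons, List.foldl_nil]
    have hcast : (1 : Int) + 2 * (c : Int) = ((2 * c + 1 : Nat) : Int) := by push_cast; ring
    rw [hcast]
    simp only [chi_odd_val]
    rw [pyRange_mult_eq n (2 * c + 1) (by omega),
      foldl_addAt n (2 * c + 1) (chi (2 * c + 1)) (by omega) (multCount n (2 * c + 1))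
        (fun m => Sfun (2 * c + 1) m) (multCount_bound n (2 * c + 1) (by omega))]
    simp only [show 2 * (c + 1) + 1 = 2 * c + 3 from by ring]
    refine List.map_congr_left fun m hm => ?_
    simp only [List.mem_range] at hm
    have hstep := Sfun_succ c m
    by_cases hd : (2 * c + 1) ∣ m ∧ 1 ≤ m
    · rw [if_pos (multCount_cover n (2 * c + 1) (by omega) m hm hd.1 hd.2),
        hstep, if_pos hd]
    · rw [if_neg (fun hex => ?_), hstep, if_neg hd, add_zero]
      obtain ⟨k, hk, he⟩ := hex
      exact hd ⟨⟨k + 1, he⟩, by rw [he]; exact Nat.mul_pos (by omega) (by omega)⟩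


def r2 (n : Nat) : Int := 4 * gsum n

lemma oddCount_eq (n : Nat) (h : 1 < n) : oddCount n = n / 2 := by
  unfold oddCount
  rw [if_pos (by exact_mod_cast h)]
  have h1 : ((n : Int) - 1 + 2 - 1) = (n : Int) := by omega
  rw [h1, show ((n : Int)) / 2 = ((n / 2 : Nat) : Int) by exact_mod_cast (Int.natCast_div n 2).symm,
    Int.toNat_natCast]

lemma ssl_core_eq (n : Nat) : ssl_core (n : Int) = (List.range n).map r2 := by
  unfold ssl_core
  simp only [Int.toNat_natCast]
  have hrep : List.replicate n (0 : Int) = (List.range n).map (fun m => Sfun 1 m) := by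
    rw [show (fun m => Sfun 1 m) = (fun _ : Nat => (0 : Int)) from funext Sfun_one,
      List.map_const', List.length_range]
  rw [hrep, pyRange_odds_eq n, B_loop n (oddCount n), List.map_map]
  refine List.map_congr_left fun m hm => ?_
  simp only [List.mem_range] at hm
  simp only [Function.comp]
  rw [Sfun_full n (2 * oddCount n + 1) m hm ?_]
  · rw [r2]
  · intro x hx hxn
    by_cases h1 : 1 < n
    · rw [oddCount_eq n h1]; omega
    · omega


def Pfun (t m : Nat) : Int :=
  if 2 ≤ m ∧ Nat.minFac m ≤ t then (Nat.minFac m : Int) else (m : Int)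

lemma sqrt_count (n : Nat) :
    PySem.List.pyRange 2 (Int.sqrt (n : Int) + 1) 1
      = (List.range (Nat.sqrt n - 1)).map (fun k : Nat => (2 : Int) + 1 * (k : Int)) := by
  rw [Int.sqrt_natCast, pyRange_pos_eq 2 ((Nat.sqrt n : Int) + 1) 1 (by omega)]
  have hcnt : (if (2 : Int) < (Nat.sqrt n : Int) + 1
      then (((Nat.sqrt n : Int) + 1 - 2 + 1 - 1) / 1).toNat else 0) = Nat.sqrt n - 1 := by
    by_cases h : (2 : Int) < (Nat.sqrt n : Int) + 1
    · rw [if_pos h]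
      have h2 : ((Nat.sqrt n : Int) + 1 - 2 + 1 - 1) / 1 = ((Nat.sqrt n - 1 : Nat) : Int) := by omega
      rw [h2, Int.toNat_natCast]
    · rw [if_neg h]
      omega
  rw [hcnt]

lemma A_sieve_loop (n : Nat) : ∀ c, c ≤ Nat.sqrt n - 1 →
    (((List.range c).map (fun k : Nat => (2 : Int) + 1 * (k : Int))).foldl
      (fun ans i =>
        if PySem.List.pyGetD ans i 0 = i then
          (PySem.List.pyRange i (n : Int) i).foldl
            (fun ans j => if PySem.List.pyGetD ans j 0 = j then PySem.List.pySetD ans j i else ans) ans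
        else ans)
      ((List.range n).map (fun m => Pfun 1 m)))
    = (List.range n).map (fun m => Pfun (1 + c) m) := by
  intro c
  induction c with
  | zero => intro _; simp
  | succ c ih =>
    intro hc
    have hs2 : 2 ≤ Nat.sqrt n := by omega
    have hsq : Nat.sqrt n * Nat.sqrt n ≤ n := by have h := Nat.sqrt_le' n; rwa [pow_two] at h
    have h2s : 2 * Nat.sqrt n ≤ Nat.sqrt n * Nat.sqrt n := Nat.mul_le_mul_right _ hs2
    have htn : 2 + c < n := by omega
    set t := 2 + c with hT
    rw [List.range_succ, List.map_append, List.foldl_append, ih (by omega)]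
    simp only [List.map_cons, List.map_nil, List.foldl_cons, List.foldl_nil]
    have hcast : (2 : Int) + 1 * (c : Int) = ((t : Nat) : Int) := by rw [hT]; push_cast; ring
    rw [hcast, getR _ n t 0 htn]
    have hPt : Pfun (1 + c) t = if Nat.minFac t ≤ 1 + c then (Nat.minFac t : Int) else (t : Int) := by
      unfold Pfun
      by_cases h : Nat.minFac t ≤ 1 + c
      · rw [if_pos ⟨by omega, h⟩, if_pos h]
      · rw [if_neg (by rintro ⟨-, h2⟩; exact h h2), if_neg h]
    by_cases hcomp : Nat.minFac t ≤ 1 + c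
    · -- t is composite: its entry is already a smaller prime, the guard fails
      have hlt : Nat.minFac t < t := by
        have := Nat.minFac_le (show 0 < t by omega)
        omega
      rw [hPt, if_pos hcomp] at *
      rw [if_neg (by
        intro h
        have : Nat.minFac t = t := by exact_mod_cast h
        omega)]
      refine List.map_congr_left fun m hm => ?_
      unfold Pfun
      by_cases h2 : 2 ≤ m
      · by_cases h3 : Nat.minFac m ≤ 1 + c
        · rw [if_pos ⟨h2, h3⟩, if_pos ⟨h2, by omega⟩]
        · rw [if_neg (by rintro ⟨-, h4⟩; exact h3 h4), if_neg ?_]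
          rintro ⟨-, h4⟩
          -- minFac m = t = 2 + c; but t is not prime while minFac is
          have hEq : Nat.minFac m = t := by omega
          have hprime : (Nat.minFac m).Prime := Nat.minFac_prime (by omega)
          have : Nat.minFac t = t := (hEq ▸ hprime).minFac_eq
          omega
      · rw [if_neg (by rintro ⟨h3, -⟩; omega), if_neg (by rintro ⟨h3, -⟩; omega)]
    · -- t is prime: the guard holds and the multiples of t get marked
      have hprime : t.Prime := by
        refine Nat.prime_def_minFac.mpr ⟨by omega, ?_⟩
        have h2 := Nat.minFac_dvd t
        have h3 := Nat.le_of_dvd (show 0 < t by omega) h2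
        omega
      have hmft : Nat.minFac t = t := hprime.minFac_eq
      rw [hPt, if_neg hcomp]
      rw [if_pos rfl, pyRange_mult_eq n t (by omega),
        foldl_markAt n t (by omega) (multCount n t) (fun m => Pfun (1 + c) m)
          (multCount_bound n t (by omega))]
      refine List.map_congr_left fun m hm => ?_
      simp only [List.mem_range] at hm
      by_cases h2 : 2 ≤ m
      · by_cases h3 : Nat.minFac m ≤ 1 + c
        · -- already marked with a smaller prime; condition cannot hold
          rw [if_neg ?_, Pfun, if_pos ⟨h2, h3⟩, Pfun, if_pos ⟨h2, by omega⟩]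
          rintro ⟨⟨k, hk, he⟩, hfm⟩
          unfold Pfun at hfm
          rw [if_pos ⟨h2, h3⟩] at hfm
          have hmm : Nat.minFac m = m := by exact_mod_cast hfm
          have hmp : m.Prime := Nat.prime_def_minFac.mpr ⟨h2, hmm⟩
          have htdvd : t ∣ m := ⟨k + 1, he⟩
          have : t = m := ((Nat.Prime.eq_one_or_self_of_dvd hmp t htdvd).resolve_left
            (by omega))
          omega
        · by_cases h4 : Nat.minFac m = t
          · -- first prime reaching m: it gets marked now
            have hdvd : t ∣ m := h4 ▸ Nat.minFac_dvd m
            rw [if_pos ⟨multCount_cover n t (by omega) m hm hdvd (by omega), by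
                unfold Pfun
                rw [if_neg (by rintro ⟨-, h5⟩; exact h3 h5)]⟩,
              Pfun, if_pos ⟨h2, by omega⟩, h4]
          · -- untouched: minFac m > 2 + c
            have h5 : ¬ Nat.minFac m ≤ 2 + c := by
              intro h5
              exact h4 (by omega)
            rw [if_neg ?_, Pfun, if_neg (by rintro ⟨-, h6⟩; exact h3 h6),
              Pfun, if_neg (by rintro ⟨-, h6⟩; exact h5 (by omega))]
            rintro ⟨⟨k, hk, he⟩, -⟩
            exact h5 ((Nat.minFac_le_of_dvd (by omega) ⟨k + 1, he⟩).trans (by omega))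
      · -- m ≤ 1 is never a multiple of t
        rw [if_neg ?_, Pfun, if_neg (by rintro ⟨h3, -⟩; omega),
          Pfun, if_neg (by rintro ⟨h3, -⟩; omega)]
        rintro ⟨⟨k, hk, he⟩, -⟩
        have : t * (k + 1) ≥ 2 := by
          have := Nat.mul_pos (show 0 < t by omega) (show 0 < k + 1 by omega)
          have h7 : t ≤ t * (k + 1) := Nat.le_mul_of_pos_right t (by omega)
          omega
        omega


lemma Pfun_one (m : Nat) : Pfun 1 m = (m : Int) := by
  unfold Pfun
  rw [if_neg]
  rintro ⟨h2, h1⟩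
  have := (Nat.minFac_prime (show m ≠ 1 by omega)).two_le
  omega

lemma pfl_eq (n : Nat) : prime_factor_list (n : Int) = (List.range n).map spfSpec := by
  unfold prime_factor_list
  have h0 : PySem.List.pyRange 0 (n : Int) 1 = (List.range n).map (fun m => Pfun 1 m) := by
    rw [pyRange_pos_eq 0 (n : Int) 1 (by omega)]
    have hcnt : (if (0 : Int) < (n : Int) then (((n : Int) - 0 + 1 - 1) / 1).toNat else 0) = n := by
      by_cases h : (0 : Int) < (n : Int)
      · rw [if_pos h]
        have h2 : ((n : Int) - 0 + 1 - 1) / 1 = (n : Int) := by omega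
        rw [h2, Int.toNat_natCast]
      · rw [if_neg h]; omega
    rw [hcnt]
    exact List.map_congr_left fun m _ => by rw [Pfun_one]; push_cast; ring
  rw [h0, sqrt_count n, A_sieve_loop n (Nat.sqrt n - 1) le_rfl]
  refine List.map_congr_left fun m hm => ?_
  simp only [List.mem_range] at hm
  unfold Pfun spfSpec
  by_cases h2 : 2 ≤ m
  · have hn1 : ¬ m ≤ 1 := by omega
    by_cases h3 : Nat.minFac m ≤ 1 + (Nat.sqrt n - 1)
    · rw [if_pos ⟨h2, h3⟩, if_neg hn1]
    · rw [if_neg (fun h => h3 h.2), if_neg hn1]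
      have hprime : m.Prime := by
        by_contra hnp
        have hsq : Nat.minFac m ^ 2 ≤ m := Nat.minFac_sq_le_self (by omega) hnp
        have h5 : Nat.minFac m ≤ Nat.sqrt m := Nat.le_sqrt.mpr (by nlinarith [hsq])
        have h6 : Nat.sqrt m ≤ Nat.sqrt n := Nat.sqrt_le_sqrt (by omega)
        have h7 : 1 ≤ Nat.sqrt n := Nat.sqrt_pos.mpr (by omega)
        exact h3 (by omega)
      rw [hprime.minFac_eq]
  · rw [if_neg (fun h => h2 h.1), if_pos (by omega)]


lemma pullOut_spec (p : Nat) (hp : 2 ≤ p) :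
    ∀ (fuel : Nat) (j : Nat) (e : Int), 1 ≤ j → j < 2 ^ fuel →
    ∃ (k : Nat) (j' : Nat), pullOut (p : Int) fuel ((j : Int), e) = ((j' : Int), e + k) ∧
      j = p ^ k * j' ∧ ¬ (p ∣ j') ∧ 1 ≤ j' := by
  intro fuel
  induction fuel with
  | zero =>
    intro j e h1 h2
    simp at h2
    omega
  | succ fuel ih =>
    intro j e h1 h2
    by_cases hd : p ∣ j
    · have hmod : PySem.Int.mod (j : Int) (p : Int) = 0 := by
        rw [PySem.Int.mod_natCast]
        exact_mod_cast (Iff.symm Nat.dvd_iff_mod_eq_zero).mpr hd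
      have hjp1 : 1 ≤ j / p := (Nat.one_le_div_iff (by omega)).mpr (Nat.le_of_dvd (by omega) hd)
      rw [pow_succ] at h2
      have hhalf : j / p ≤ j / 2 := Nat.div_le_div_left hp (by omega)
      have hjp2 : j / p < 2 ^ fuel := by omega
      obtain ⟨k, j', heq, hfact, hnd, hj1⟩ := ih (j / p) (e + 1) hjp1 hjp2
      refine ⟨k + 1, j', ?_, ?_, hnd, hj1⟩
      · simp only [pullOut]
        rw [if_pos hmod, PySem.Int.floordiv_natCast, heq]
        rw [Prod.mk.injEq]
        refine ⟨rfl, by push_cast; ring⟩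
      · have hc : p * (j / p) = j := Nat.mul_div_cancel' hd
        rw [← hc, hfact]
        ring
    · have hmod : ¬ PySem.Int.mod (j : Int) (p : Int) = 0 := by
        rw [PySem.Int.mod_natCast]
        intro h
        exact hd ((Iff.symm Nat.dvd_iff_mod_eq_zero).mp (by exact_mod_cast h))
      refine ⟨0, j, ?_, by simp, hd, h1⟩
      simp only [pullOut]
      rw [if_neg hmod]
      simp

-- state of A's main loop: entries below t already hold r2, the rest still the spf table
def FF (t m : Nat) : Int := if m < t then r2 m else spfSpec m

lemma range2_count (n : Nat) :
    PySem.List.pyRange 2 (n : Int) 1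
      = (List.range (n - 2)).map (fun k : Nat => (2 : Int) + 1 * (k : Int)) := by
  rw [pyRange_pos_eq 2 (n : Int) 1 (by omega)]
  have hcnt : (if (2 : Int) < (n : Int) then (((n : Int) - 2 + 1 - 1) / 1).toNat else 0) = n - 2 := by
    by_cases h : (2 : Int) < (n : Int)
    · rw [if_pos h]
      have h2 : ((n : Int) - 2 + 1 - 1) / 1 = ((n - 2 : Nat) : Int) := by omega
      rw [h2, Int.toNat_natCast]
    · rw [if_neg h]; omega
  rw [hcnt]

lemma cast_mod_two (a : Nat) : PySem.Int.mod ((a : Nat) : Int) 2 = ((a % 2 : Nat) : Int) := by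
  rw [show (2 : Int) = ((2 : Nat) : Int) from rfl, PySem.Int.mod_natCast]

lemma cast_mod_four (a : Nat) : PySem.Int.mod ((a : Nat) : Int) 4 = ((a % 4 : Nat) : Int) := by
  rw [show (4 : Int) = ((4 : Nat) : Int) from rfl, PySem.Int.mod_natCast]

lemma A_main_loop (n : Nat) (hn : 2 ≤ n) : ∀ c, c ≤ n - 2 →
    (((List.range c).map (fun k : Nat => (2 : Int) + 1 * (k : Int))).foldl
      (fun ans i =>
        let p := PySem.List.pyGetD ans i 0
        let j := PySem.Int.floordiv i p
        if PySem.Int.mod p 2 = 0 then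
          PySem.List.pySetD ans i (PySem.List.pyGetD ans j 0)
        else
          let je := pullOut p i.toNat (j, 1)
          if PySem.Int.mod p 4 = 1 then
            PySem.List.pySetD ans i ((je.2 + 1) * PySem.List.pyGetD ans je.1 0)
          else if PySem.Int.mod p 4 = 3 then
            PySem.List.pySetD ans i
              (if PySem.Int.mod je.2 2 = 0 then PySem.List.pyGetD ans je.1 0 else 0)
          else ans)
      ((List.range n).map (fun m => FF 2 m)))
    = (List.range n).map (fun m => FF (2 + c) m) := by
  intro c
  induction c with
  | zero => intro _; simp
  | succ c ih =>
    intro hc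
    rw [List.range_succ, List.map_append, List.foldl_append, ih (by omega)]
    simp only [List.map_cons, List.map_nil, List.foldl_cons, List.foldl_nil]
    set t := 2 + c with hT
    have htn : t < n := by omega
    have hcast : (2 : Int) + 1 * (c : Int) = ((t : Nat) : Int) := by rw [hT]; push_cast; ring
    rw [hcast]
    have hget : PySem.List.pyGetD ((List.range n).map (fun m => FF (2 + c) m)) ((t : Nat) : Int) 0
        = ((Nat.minFac t : Nat) : Int) := by
      rw [getR _ n t 0 htn]
      unfold FF spfSpec
      rw [if_neg (by omega), if_neg (by omega)]
    rw [hget]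
    set P := Nat.minFac t with hPdef
    have hPp : P.Prime := Nat.minFac_prime (by omega)
    have hP2 : 2 ≤ P := hPp.two_le
    have hPd : P ∣ t := Nat.minFac_dvd t
    have hPt : P ≤ t := Nat.le_of_dvd (by omega) hPd
    have hjdiv : PySem.Int.floordiv ((t : Nat) : Int) ((P : Nat) : Int) = ((t / P : Nat) : Int) :=
      PySem.Int.floordiv_natCast t P
    rw [hjdiv, cast_mod_two P]
    have htp1 : 1 ≤ t / P := (Nat.one_le_div_iff (by omega)).mpr hPt
    have htpt : t / P < t := Nat.div_lt_self (by omega) (by omega)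
    by_cases hPe : P % 2 = 0
    · -- p == 2
      have hP2e : P = 2 := by
        rcases hPp.eq_one_or_self_of_dvd 2 (Nat.dvd_of_mod_eq_zero hPe) with h | h <;> omega
      rw [if_pos (by rw [hPe]; rfl)]
      rw [getR _ n (t / P) 0 (by omega), setR _ n t _ htn]
      refine List.map_congr_left fun m hm => ?_
      simp only [List.mem_range] at hm
      by_cases hmt : m = t
      · subst hmt
        rw [if_pos rfl]
        unfold FF
        rw [if_pos (show t / P < 2 + c by omega), if_pos (show t < 2 + (c + 1) by omega)]
        -- r2 (t/2) = r2 t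
        have h2d : t = 2 * (t / 2) := by
          rw [hP2e] at hPd
          omega
        unfold r2
        rw [hP2e, show gsum t = gsum (2 * (t / 2)) from by rw [← h2d],
          gsum_two_mul (t / 2) (by omega)]
      · rw [if_neg hmt]
        unfold FF
        by_cases h1 : m < 2 + c
        · rw [if_pos h1, if_pos (by omega)]
        · rw [if_neg h1, if_neg (by omega)]
    · -- p odd
      rw [if_neg (by
        intro h
        have : (P % 2 : Nat) = 0 := by exact_mod_cast h
        omega)]
      have hPodd : P % 2 = 1 := by omega
      -- the extraction loop
      have hfuel : t / P < 2 ^ t := lt_of_lt_of_le (by omega) (Nat.le_of_lt (Nat.lt_two_pow_self))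
      obtain ⟨k, j', heq, hfact, hnd, hj1⟩ := pullOut_spec P hP2 t (t / P) 1 htp1 hfuel
      have hTNat : (((t : Nat) : Int)).toNat = t := Int.toNat_natCast t
      rw [hTNat, heq]
      have hj'tp : j' ≤ t / P := by
        rw [hfact]
        exact Nat.le_mul_of_pos_left j' (Nat.pow_pos (by omega))
      have hj'n : j' < n := by omega
      have hj't : j' < 2 + c := by omega
      have hgetj : PySem.List.pyGetD ((List.range n).map (fun m => FF (2 + c) m)) ((j' : Nat) : Int) 0
          = r2 j' := by
        rw [getR _ n j' 0 hj'n]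
        unfold FF
        rw [if_pos hj't]
      have hTfact : t = P ^ (k + 1) * j' := by
        have hc2 : P * (t / P) = t := Nat.mul_div_cancel' hPd
        rw [← hc2, hfact]
        ring
      have hcop : Nat.Coprime (P ^ (k + 1)) j' :=
        Nat.Coprime.pow_left _ ((Nat.Prime.coprime_iff_not_dvd hPp).mpr hnd)
      have hgs : gsum t = gsum (P ^ (k + 1)) * gsum j' := by
        rw [hTfact, gsum_mul hcop]
      have hP4 : P % 4 = 1 ∨ P % 4 = 3 := by omega
      rcases hP4 with h4 | h4
      · -- p % 4 == 1
        rw [if_pos (by rw [cast_mod_four P, h4]; rfl)]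
        rw [hgetj, setR _ n t _ htn]
        have hchiP : chi P = 1 := by simp [chi, h4]
        have hgp : gsum (P ^ (k + 1)) = (k : Int) + 2 := by
          rw [gsum_prime_pow hPp (k + 1), hchiP]
          simp
          push_cast
          ring
        refine List.map_congr_left fun m hm => ?_
        simp only [List.mem_range] at hm
        by_cases hmt : m = t
        · subst hmt
          rw [if_pos rfl]
          unfold FF
          rw [if_pos (by omega)]
          unfold r2
          rw [hgs, hgp]
          push_cast
          ring
        · rw [if_neg hmt]
          unfold FF
          by_cases h1 : m < 2 + c
          · rw [if_pos h1, if_pos (by omega)]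
          · rw [if_neg h1, if_neg (by omega)]
      · -- p % 4 == 3
        rw [if_neg (by
            rw [cast_mod_four P, h4]
            intro hcontra
            exact absurd (by exact_mod_cast hcontra : (3 : Nat) = 1) (by omega)),
          if_pos (by rw [cast_mod_four P, h4]; rfl)]
        rw [hgetj]
        have hchiP : chi P = -1 := by simp [chi, h4]
        have hgp : gsum (P ^ (k + 1)) = if Even (k + 2) then 0 else 1 := by
          rw [gsum_prime_pow hPp (k + 1), hchiP]
          exact neg_one_geom_sum
        have hje2 : (1 : Int) + (k : Int) = (((k + 1 : Nat)) : Int) := by push_cast; ring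
        rw [hje2, cast_mod_two (k + 1)]
        by_cases hke : (k + 1) % 2 = 0
        · -- e even: r2 t = r2 j'
          rw [if_pos (by rw [hke]; rfl), setR _ n t _ htn]
          refine List.map_congr_left fun m hm => ?_
          simp only [List.mem_range] at hm
          by_cases hmt : m = t
          · subst hmt
            rw [if_pos rfl]
            unfold FF
            rw [if_pos (by omega)]
            unfold r2
            rw [hgs, hgp, if_neg (by rw [Nat.even_iff]; omega)]
            ring
          · rw [if_neg hmt]
            unfold FF
            by_cases h1 : m < 2 + c
            · rw [if_pos h1, if_pos (by omega)]
            · rw [if_neg h1, if_neg (by omega)]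
        · -- e odd: r2 t = 0
          rw [if_neg (by
              intro hcontra
              have : ((k + 1) % 2 : Nat) = 0 := by exact_mod_cast hcontra
              omega),
            setR _ n t _ htn]
          refine List.map_congr_left fun m hm => ?_
          simp only [List.mem_range] at hm
          by_cases hmt : m = t
          · subst hmt
            rw [if_pos rfl]
            unfold FF
            rw [if_pos (by omega)]
            unfold r2
            rw [hgs, hgp, if_pos (by rw [Nat.even_iff]; omega)]
            ring
          · rw [if_neg hmt]
            unfold FF
            by_cases h1 : m < 2 + c
            · rw [if_pos h1, if_pos (by omega)]
            · rw [if_neg h1, if_neg (by omega)]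

lemma FF_two (n : Nat) :
    (List.range n).map (fun m => if m = 1 then (4 : Int) else spfSpec m)
      = (List.range n).map (fun m => FF 2 m) := by
  refine List.map_congr_left fun m hm => ?_
  unfold FF
  by_cases h1 : m = 1
  · subst h1
    rw [if_pos rfl, if_pos (by omega)]
    unfold r2
    rw [gsum_one]
    norm_num
  · rw [if_neg h1]
    by_cases h0 : m = 0
    · subst h0
      rw [if_pos (by omega)]
      unfold spfSpec r2
      rw [if_pos (by omega), gsum_zero]
      simp
    · rw [if_neg (by omega)]

lemma A_post (n : Nat) (ans0 : List Int) (hans : ans0 = (List.range n).map spfSpec) :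
    ((PySem.List.pyRange 2 (n : Int) 1).foldl
      (fun ans i =>
        let p := PySem.List.pyGetD ans i 0
        let j := PySem.Int.floordiv i p
        if PySem.Int.mod p 2 = 0 then
          PySem.List.pySetD ans i (PySem.List.pyGetD ans j 0)
        else
          let je := pullOut p i.toNat (j, 1)
          if PySem.Int.mod p 4 = 1 then
            PySem.List.pySetD ans i ((je.2 + 1) * PySem.List.pyGetD ans je.1 0)
          else if PySem.Int.mod p 4 = 3 then
            PySem.List.pySetD ans i
              (if PySem.Int.mod je.2 2 = 0 then PySem.List.pyGetD ans je.1 0 else 0)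
          else ans)
      (if ((n : Int)) > 1 then PySem.List.pySetD ans0 1 4 else ans0))
    = (List.range n).map r2 := by
  subst hans
  by_cases hn : 2 ≤ n
  · have hset := setR spfSpec n 1 4 (show 1 < n by omega)
    rw [Nat.cast_one] at hset
    rw [if_pos (by exact_mod_cast hn), hset, FF_two n, range2_count n,
      A_main_loop n hn (n - 2) le_rfl]
    refine List.map_congr_left fun m hm => ?_
    simp only [List.mem_range] at hm
    unfold FF
    rw [if_pos (by omega)]
  · rw [if_neg (by omega), range2_count n, show n - 2 = 0 from by omega]
    simp only [List.range_zero, List.map_nil, List.foldl_nil]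
    refine List.map_congr_left fun m hm => ?_
    simp only [List.mem_range] at hm
    unfold spfSpec r2
    rw [if_pos (by omega), show m = 0 by omega, gsum_zero]
    simp

lemma slice_pre (n : Nat) (x : Int) (xs : List Int)
    (hlen : (n : Int) ≤ ((x :: xs).length : Int))
    (hval : ∀ i < n, (x :: xs).getD i 0 = spfSpec i) :
    PySem.List.slice (x :: xs) none (some (n : Int)) = (List.range n).map spfSpec := by
  rw [PySem.List.slice_to_natCast]
  apply List.ext_getElem
  · rw [List.length_take, List.length_map, List.length_range]
    simp only [List.length_cons] at hlen ⊢
    omega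
  · intro i h1 h2
    simp only [List.getElem_take, List.getElem_map, List.getElem_range]
    have hi : i < n := by simp at h1; omega
    have hilen : i < (x :: xs).length := by
      have : (n : Int) ≤ (x :: xs).length := hlen
      omega
    rw [← hval i hi, List.getD_eq_getElem _ _ hilen]


lemma A_neg (end_ : Int) (x : Int) (xs : List Int) (hneg : end_ < 0)
    (hlen : ((x :: xs).length : Int) ≤ -end_) :
    sum_squares_list end_ (some (x :: xs)) = [] := by
  simp only [sum_squares_list]
  rw [if_neg (by omega)]
  have hsl : PySem.List.slice (x :: xs) none (some end_) = [] := by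
    rw [show end_ = -((((-end_).toNat : Nat)) : Int) from by omega,
      PySem.List.slice_to_neg_natCast _ _ (by omega),
      show (x :: xs).length - (-end_).toNat = 0 from by omega]
    rfl
  rw [hsl, if_neg (by omega), pyRange_pos_eq 2 end_ 1 (by omega), if_neg (by omega)]
  simp

lemma B_neg (end_ : Int) (hneg : end_ < 0) : ssl_core end_ = [] := by
  unfold ssl_core
  rw [show end_.toNat = 0 from by omega, pyRange_pos_eq 1 end_ 2 (by omega), if_neg (by omega)]
  simp

-- ===== VERDICT (by name: the statement is the Claim_ definition above) =====
theorem sum_squares_list_spec : Claim_unchanged_sum_squares_list := by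
  rintro end_ pf _ hpre
  unfold Spec_sum_squares_list
  intro hnd
  unfold D_sum_squares_list at hnd
  unfold Pre_sum_squares_list at hpre
  match pf with
  | none =>
    have h0 : (0 : Int) ≤ end_ := by simpa using hpre
    obtain ⟨n, rfl⟩ : ∃ n : Nat, end_ = (n : Int) := ⟨end_.toNat, (Int.toNat_of_nonneg h0).symm⟩
    simp only [sum_squares_list, sum_squares_list_alt]
    rw [pfl_eq, A_post n _ rfl, ssl_core_eq]
  | some [] =>
    have h0 : (0 : Int) ≤ end_ := by simpa using hpre
    obtain ⟨n, rfl⟩ : ∃ n : Nat, end_ = (n : Int) := ⟨end_.toNat, (Int.toNat_of_nonneg h0).symm⟩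
    simp only [sum_squares_list, sum_squares_list_alt]
    rw [pfl_eq, A_post n _ rfl, ssl_core_eq]
  | some (x :: xs) =>
    have hcons : ¬ ((some (x :: xs)).getD ([] : List Int) = []) := by simp
    rw [if_neg hcons] at hpre
    obtain ⟨hlen, himp, hnegimp⟩ := hpre
    simp only [Option.getD_some] at hlen himp hnegimp
    by_cases hneg : end_ < 0
    · rw [A_neg end_ x xs hneg (hnegimp hneg)]
      simp only [sum_squares_list_alt]
      rw [if_neg (by omega), B_neg end_ hneg]
    · obtain ⟨n, rfl⟩ : ∃ n : Nat, end_ = (n : Int) := ⟨end_.toNat, (Int.toNat_of_nonneg (by omega)).symm⟩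
      have hval : ∀ i < n, (x :: xs).getD i 0 = spfSpec i := by
        intro i hi
        by_cases h2 : (2 : Int) ≤ (n : Int)
        · have h3 := himp h2
          rw [Int.toNat_natCast] at h3
          exact h3 i hi
        · -- here n = 1 and i = 0; outside D_ the head must be 0
          have hn1 : n = 1 := by omega
          have hi0 : i = 0 := by omega
          have hx0 : x = 0 := by
            by_contra hx0
            exact hnd ⟨hcons, by omega, by simpa using hx0⟩
          subst hi0
          rw [hx0]
          rfl
      simp only [sum_squares_list, sum_squares_list_alt]
      rw [if_neg (show ¬ ((x :: xs).length : Int) < (n : Int) from by omega)]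
      rw [slice_pre n x xs hlen hval, A_post n _ rfl, ssl_core_eq,
        if_neg (show ¬ ((x :: xs).length : Int) < (n : Int) from by omega)]

theorem sum_squares_list_changed : Claim_changed_sum_squares_list := by
  unfold Claim_changed_sum_squares_list; decide

theorem sum_squares_list_tight : Claim_exact_sum_squares_list := by
  rintro end_ pf _ hpre ⟨hcons, h1, hhead⟩
  subst h1
  match pf with
  | none => exact absurd rfl hcons
  | some [] => exact absurd rfl hcons
  | some (x :: xs) =>
    simp only [Option.getD_some, List.getD_cons_zero] at hhead
    simp only [sum_squares_list, sum_squares_list_alt]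
    have hlen : ¬ ((x :: xs).length : Int) < (1 : Int) := by
      simp only [List.length_cons]
      push_cast
      omega
    rw [if_neg hlen, if_neg hlen]
    have hsl : PySem.List.slice (x :: xs) none (some (1 : Int)) = [x] := by
      rw [show (1 : Int) = ((1 : Nat) : Int) from rfl, PySem.List.slice_to_natCast]
      rfl
    rw [hsl, if_neg (by omega), pyRange_pos_eq 2 1 1 (by omega), if_neg (by omega)]
    simp only [List.range_zero, List.map_nil, List.foldl_nil]
    intro heq
    have : x = 0 := by
      have h2 : ssl_core (1 : Int) = [0] := by decide
      rw [h2] at heq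
      simpa using heq
    exact hhead this
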